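-- pv_equiv track=rewrite | github.com/nitin35byte/new_prython_practise_repo | LeetCode/reverse name without removing space.py | reverse_string_with_spaces
-- ===== SOURCE A (Python) =====
-- def reverse_string_with_spaces(input_str):
--     # Convert the input string into a list of characters
--     char_list = list(input_str)
--
--     # Initialize variables for constructing the reversed string
--     reversed_str = [''] * len(char_list)
--     end = len(char_list) - 1
--
--     # Traverse the input string from right to left
--     for i in range(len(char_list)):
--         # Skip over spaces by leaving the current position unchanged
--         if char_list[i] == ' ':
--             continue
--
--         # Find the next space to determine word boundaries
--         while end >= 0 and char_list[end] == ' ':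
--             end -= 1
--
--         # Copy non-space characters to the reversed string
--         reversed_str[end] = char_list[i]
--         end -= 1
--
--     # Join the list of characters into a single string
--     reversed_output = ''.join(reversed_str)
--
--     return reversed_output
-- ===== SOURCE B (Python) =====
-- def reverse_string_with_spaces(input_str):
--     # Despite its name, A deletes the spaces: its output is the input reversed
--     # with every ' ' removed.  Do that directly in one reverse-and-filter pass.
--     return ''.join(c for c in reversed(input_str) if c != ' ')
-- ===== Notes on version B (the rewrite author's own statement) =====
-- stated objective: simpler
-- what changed: Replaced A's positional-array placement with a decreasing end pointer and inner space-skipping while loop by a single reverse-then-filter pass (join of reversed chars that are not ' ').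
import Mathlib
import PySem

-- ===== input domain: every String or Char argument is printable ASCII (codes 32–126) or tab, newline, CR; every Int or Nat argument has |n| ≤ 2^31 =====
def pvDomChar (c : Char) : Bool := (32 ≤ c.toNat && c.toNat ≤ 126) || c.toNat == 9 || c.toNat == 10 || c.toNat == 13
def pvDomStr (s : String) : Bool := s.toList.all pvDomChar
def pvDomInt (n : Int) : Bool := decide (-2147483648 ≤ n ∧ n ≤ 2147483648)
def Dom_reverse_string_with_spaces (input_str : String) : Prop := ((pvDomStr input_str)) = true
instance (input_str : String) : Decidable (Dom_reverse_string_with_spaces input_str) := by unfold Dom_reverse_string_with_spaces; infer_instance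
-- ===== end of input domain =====

-- B replaces A's positional write-back array with a single reverse-then-filter pass (objective: simpler).

-- ===== PORT A =====
-- inner 'while end >= 0 and char_list[end] == ' ': end -= 1'
def pvSkipSpaces (cs : List Char) (e : Int) : Int :=
  if h : 0 ≤ e ∧ PySem.List.pyGetD cs e ' ' = ' ' then pvSkipSpaces cs (e - 1) else e
termination_by (e + 1).toNat
decreasing_by omega

def reverse_string_with_spaces (input_str : String) : String :=
  let char_list := input_str.toList
  -- reversed_str = [''] * len(char_list): a list of character lists, '' = []
  let init : List (List Char) := List.replicate char_list.length []
  let st :=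
    (PySem.List.pyRange 0 char_list.length 1).foldl
      (fun (st : List (List Char) × Int) i =>
        let c := PySem.List.pyGetD char_list i ' '
        if c = ' ' then st
        else
          let e := pvSkipSpaces char_list st.2
          (PySem.List.pySetD st.1 e [c], e - 1))
      (init, (char_list.length : Int) - 1)
  -- ''.join(reversed_str): concatenation of the slots (exact: each slot is a char list)
  String.ofList st.1.flatten

-- ===== PORT B =====
def reverse_string_with_spaces_alt (input_str : String) : String :=
  String.ofList ((input_str.toList.reverse).filter (· ≠ ' '))

-- ===== PRECONDITION & SPEC =====
def Spec_reverse_string_with_spaces (input_str : String) (out : String) : Prop := out = reverse_string_with_spaces_alt input_str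
instance (input_str : String) (out : String) : Decidable (Spec_reverse_string_with_spaces input_str out) := by unfold Spec_reverse_string_with_spaces; infer_instance

-- ===== CLAIM (what is proved, stated in full; the proofs are below) =====
def Claim_equal_reverse_string_with_spaces : Prop := ∀ (input_str : String), Dom_reverse_string_with_spaces input_str → Spec_reverse_string_with_spaces input_str (reverse_string_with_spaces input_str)

-- ===== LEMMAS AND PROOFS =====

-- the loop body of A, as a function of the current character
def pvF (cs : List Char) (st : List (List Char) × Int) (c : Char) : List (List Char) × Int :=
  if c = ' ' then st
  else
    let e := pvSkipSpaces cs st.2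
    (PySem.List.pySetD st.1 e [c], e - 1)

-- number of non-space characters of cs at positions ≤ e
def pvCnt (cs : List Char) (e : Int) : Nat := (cs.take (e + 1).toNat).countP (· ≠ ' ')

lemma pvCnt_neg (cs : List Char) (e : Int) (he : e < 0) : pvCnt cs e = 0 := by
  unfold pvCnt
  have : (e + 1).toNat = 0 := by omega
  simp [this]

lemma pvCnt_succ (cs : List Char) (e : Int) (h0 : 0 ≤ e) (he : e < cs.length) :
    pvCnt cs e = pvCnt cs (e - 1) + (if cs.getD e.toNat ' ' ≠ ' ' then 1 else 0) := by
  unfold pvCnt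
  have h1 : (e + 1).toNat = e.toNat + 1 := by omega
  have h2 : (e - 1 + 1).toNat = e.toNat := by omega
  have hlt : e.toNat < cs.length := by omega
  rw [h1, h2, List.take_add_one, List.getElem?_eq_getElem hlt, List.countP_append]
  simp
  split_ifs with h <;> simp_all

lemma pvSkip_spec (cs : List Char) (e : Int) (he : e < cs.length) (h : 0 < pvCnt cs e) :
    0 ≤ pvSkipSpaces cs e ∧ pvSkipSpaces cs e ≤ e ∧
      cs.getD (pvSkipSpaces cs e).toNat ' ' ≠ ' ' ∧ pvCnt cs (pvSkipSpaces cs e) = pvCnt cs e := by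
  fun_induction pvSkipSpaces cs e with
  | case1 e hcond ih =>
    obtain ⟨h0, hsp⟩ := hcond
    have hlt : e.toNat < cs.length := by omega
    have hgd : cs.getD e.toNat ' ' = ' ' := by
      rwa [PySem.List.pyGetD_eq_getElem cs ' ' h0 he, ← List.getD_eq_getElem cs ' ' hlt] at hsp
    have hc : pvCnt cs (e - 1) = pvCnt cs e := by
      have := pvCnt_succ cs e h0 he
      rw [hgd] at this
      simp at this; omega
    have h' : 0 < pvCnt cs (e - 1) := by omega
    have := ih (by omega) h'
    rw [hc] at this
    exact ⟨this.1, by omega, this.2.2.1, this.2.2.2⟩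
  | case2 e hcond =>
    have h0 : 0 ≤ e := by
      by_contra hneg
      have := pvCnt_neg cs e (by omega)
      omega
    refine ⟨h0, le_refl e, ?_, rfl⟩
    intro hsp
    have hlt : e.toNat < cs.length := by omega
    exact hcond ⟨h0, by
      rw [PySem.List.pyGetD_eq_getElem cs ' ' h0 he, ← List.getD_eq_getElem cs ' ' hlt]
      exact hsp⟩

-- a blank prefix contributes nothing to flatten
lemma pvFlatten_drop (arr : List (List Char)) (k : Nat)
    (hb : ∀ j : Nat, j < k → arr.getD j [] = []) : arr.flatten = (arr.drop k).flatten := by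
  induction k generalizing arr with
  | zero => simp
  | succ k ih =>
    cases arr with
    | nil => simp
    | cons a as =>
      have ha : a = [] := hb 0 (by omega)
      rw [ha]
      simpa using ih as (fun j hj => hb (j + 1) (by omega))

lemma pvFlatten_take (arr : List (List Char)) (k : Nat)
    (hb : ∀ j : Nat, j < k → arr.getD j [] = []) : (arr.take k).flatten = [] := by
  induction k generalizing arr with
  | zero => simp
  | succ k ih =>
    cases arr with
    | nil => simp
    | cons a as =>
      have ha : a = [] := hb 0 (by omega)
      rw [List.take_succ_cons, ha]
      simpa using ih as (fun j hj => hb (j + 1) (by omega))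

lemma pvFlatten_set (arr : List (List Char)) (m : Nat) (v : List Char) (hm : m < arr.length)
    (hb : ∀ j : Nat, j < m → arr.getD j [] = []) :
    (arr.set m v).flatten = v ++ (arr.drop (m + 1)).flatten := by
  rw [List.set_eq_take_cons_drop v hm, List.flatten_append, pvFlatten_take arr m hb]
  simp

-- loop invariant of A's fold: the part of the array ≤ e is blank and will receive
-- exactly the non-space characters of t, from position e downwards
lemma pvMain (cs : List Char) (t : List Char) (arr : List (List Char)) (e : Int)
    (hlen : arr.length = cs.length) (he : e < cs.length)
    (hb : ∀ j : Nat, (j : Int) ≤ e → arr.getD j [] = [])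
    (hc : pvCnt cs e = (t.filter (· ≠ ' ')).length) :
    (t.foldl (pvF cs) (arr, e)).1.flatten = (t.filter (· ≠ ' ')).reverse ++ arr.flatten := by
  induction t generalizing arr e with
  | nil => simp
  | cons c t' ih =>
    by_cases hcsp : c = ' '
    · have hfc : (c :: t').filter (· ≠ ' ') = t'.filter (· ≠ ' ') := by
        simp [hcsp]
      rw [hfc] at hc ⊢
      simp only [List.foldl_cons, pvF, if_pos hcsp]
      exact ih arr e hlen he hb hc
    · have hfc : (c :: t').filter (· ≠ ' ') = c :: t'.filter (· ≠ ' ') := by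
        simp [hcsp]
      have hc' : pvCnt cs e = (t'.filter (· ≠ ' ')).length + 1 := by
        rw [hfc, List.length_cons] at hc; exact hc
      have hpos : 0 < pvCnt cs e := by omega
      obtain ⟨h0, hle, hns, hceq⟩ := pvSkip_spec cs e he hpos
      set e' := pvSkipSpaces cs e with he'
      have he'lt : e'.toNat < arr.length := by omega
      have hset : PySem.List.pySetD arr e' [c] = arr.set e'.toNat [c] :=
        PySem.List.pySetD_of_nonneg arr [c] h0
      have hcnt' : pvCnt cs (e' - 1) = (t'.filter (· ≠ ' ')).length := by
        have := pvCnt_succ cs e' h0 (by omega)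
        rw [if_pos hns] at this
        omega
      have hbset : ∀ j : Nat, (j : Int) ≤ e' - 1 → (arr.set e'.toNat [c]).getD j [] = [] := by
        intro j hj
        rw [List.getD, List.getElem?_set_ne (by omega), ← List.getD]
        exact hb j (by omega)
      have ihres := ih (arr.set e'.toNat [c]) (e' - 1)
        (by simpa using hlen) (by omega) hbset hcnt' 
      simp only [List.foldl_cons, pvF, if_neg hcsp, ← he', hset]
      rw [ihres, pvFlatten_set arr e'.toNat [c] he'lt
        (fun j hj => hb j (by omega))]
      rw [pvFlatten_drop arr (e'.toNat + 1) (fun j hj => hb j (by omega)), hfc]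
      simp



-- the loop body of A, as a function of the current character
-- ===== VERDICT (by name: the statement is the Claim_ definition above) =====
theorem reverse_string_with_spaces_spec : Claim_equal_reverse_string_with_spaces := by
  intro s _
  unfold Spec_reverse_string_with_spaces reverse_string_with_spaces reverse_string_with_spaces_alt
  simp only []
  rw [show ∀ init, (PySem.List.pyRange 0 (s.toList.length : Int) 1).foldl
      (fun (st : List (List Char) × Int) i =>
        let c := PySem.List.pyGetD s.toList i ' '
        if c = ' ' then st
        else
          let e := pvSkipSpaces s.toList st.2
          (PySem.List.pySetD st.1 e [c], e - 1)) init
      = s.toList.foldl (pvF s.toList) init from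
    fun init => PySem.List.foldl_pyRange_zero_pyGetD' s.toList ' ' (pvF s.toList) init]
  rw [pvMain s.toList s.toList (List.replicate s.toList.length []) ((s.toList.length : Int) - 1)
    (by simp) (by omega)
    (by intro j hj; simp)
    (by
      unfold pvCnt
      have : ((s.toList.length : Int) - 1 + 1).toNat = s.toList.length := by omega
      rw [this, List.take_length, List.countP_eq_length_filter])]
  rw [List.filter_reverse]
  simp
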